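-- pv_equiv track=rewrite | github.com/Exios66/Morningstar | tools/state.py | normalize_severity
-- ===== SOURCE A (Python) =====
-- VALID_SEVERITIES = ['Low', 'Medium', 'High', 'Critical']
--
-- def normalize_severity(severity: str) -> str:
--     """Normalize severity to valid values."""
--     severity_lower = severity.lower()
--     for valid in VALID_SEVERITIES:
--         if severity_lower == valid.lower():
--             return valid
--     # Fuzzy matching
--     if 'crit' in severity_lower:
--         return 'Critical'
--     if 'high' in severity_lower:
--         return 'High'
--     if 'low' in severity_lower:
--         return 'Low'
--     return 'Medium'
-- ===== SOURCE B (Python) =====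
-- def normalize_severity(severity: str) -> str:
--     """Normalize severity to valid values (single fuzzy pass)."""
--     s = severity.lower()
--     if 'crit' in s:
--         return 'Critical'
--     if 'high' in s:
--         return 'High'
--     if 'low' in s:
--         return 'Low'
--     return 'Medium'
-- ===== Notes on version B (the rewrite author's own statement) =====
-- stated objective: simpler
-- what changed: Dropped A's exact-match loop over VALID_SEVERITIES entirely: every canonical value is already mapped correctly by the substring tests, so B is a single fuzzy pass (crit/high/low, default Medium).
import Mathlib
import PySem

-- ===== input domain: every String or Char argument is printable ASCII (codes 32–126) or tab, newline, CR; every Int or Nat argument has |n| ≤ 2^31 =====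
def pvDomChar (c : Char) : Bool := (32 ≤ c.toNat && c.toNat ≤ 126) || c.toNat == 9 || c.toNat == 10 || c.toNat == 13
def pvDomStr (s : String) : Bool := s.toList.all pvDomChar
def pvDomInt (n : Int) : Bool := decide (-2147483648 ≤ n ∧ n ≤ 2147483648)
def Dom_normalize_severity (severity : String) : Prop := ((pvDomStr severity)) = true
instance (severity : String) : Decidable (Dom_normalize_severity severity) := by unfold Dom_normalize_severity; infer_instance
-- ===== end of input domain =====

-- B drops A's redundant exact-match loop: one lowercase pass with only the substring tests (simpler).
-- ===== PORT A =====
def VALID_SEVERITIES : List String := ["Low", "Medium", "High", "Critical"]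

def pvFindExact (sl : String) : List String → Option String
  | [] => none
  | v :: rest => if sl == PySem.Str.lower v then some v else pvFindExact sl rest

def normalize_severity (severity : String) : String :=
  let severity_lower := PySem.Str.lower severity
  match pvFindExact severity_lower VALID_SEVERITIES with
  | some v => v
  | none =>
    if PySem.Str.isIn "crit" severity_lower then "Critical"
    else if PySem.Str.isIn "high" severity_lower then "High"
    else if PySem.Str.isIn "low" severity_lower then "Low"
    else "Medium"

-- ===== PORT B =====
def normalize_severity_alt (severity : String) : String :=
  let s := PySem.Str.lower severity
  if PySem.Str.isIn "crit" s then "Critical"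
  else if PySem.Str.isIn "high" s then "High"
  else if PySem.Str.isIn "low" s then "Low"
  else "Medium"

-- ===== PRECONDITION & SPEC =====
def Spec_normalize_severity (severity : String) (out : String) : Prop := out = normalize_severity_alt severity
instance (severity : String) (out : String) : Decidable (Spec_normalize_severity severity out) := by unfold Spec_normalize_severity; infer_instance

-- ===== CLAIM (what is proved, stated in full; the proofs are below) =====
def Claim_equal_normalize_severity : Prop := ∀ (severity : String), Dom_normalize_severity severity → Spec_normalize_severity severity (normalize_severity severity)

-- ===== LEMMAS AND PROOFS =====
theorem pv_main (sl : String) :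
    (match pvFindExact sl VALID_SEVERITIES with
     | some v => v
     | none =>
       if PySem.Str.isIn "crit" sl then "Critical"
       else if PySem.Str.isIn "high" sl then "High"
       else if PySem.Str.isIn "low" sl then "Low"
       else "Medium")
    = (if PySem.Str.isIn "crit" sl then "Critical"
       else if PySem.Str.isIn "high" sl then "High"
       else if PySem.Str.isIn "low" sl then "Low"
       else "Medium") := by
  by_cases h1 : sl = "low"
  · subst h1; decide
  by_cases h2 : sl = "medium"
  · subst h2; decide
  by_cases h3 : sl = "high"
  · subst h3; decide
  by_cases h4 : sl = "critical"
  · subst h4; decide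
  have hnone : pvFindExact sl VALID_SEVERITIES = none := by
    simp only [pvFindExact, VALID_SEVERITIES]
    have e1 : PySem.Str.lower "Low" = "low" := by decide
    have e2 : PySem.Str.lower "Medium" = "medium" := by decide
    have e3 : PySem.Str.lower "High" = "high" := by decide
    have e4 : PySem.Str.lower "Critical" = "critical" := by decide
    rw [e1, e2, e3, e4]
    simp [h1, h2, h3, h4]
  rw [hnone]

-- ===== VERDICT (by name: the statement is the Claim_ definition above) =====
theorem normalize_severity_spec : Claim_equal_normalize_severity := by
  intro severity _
  unfold Spec_normalize_severity normalize_severity normalize_severity_alt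
  exact pv_main (PySem.Str.lower severity)
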